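-- pv_equiv track=rewrite | github.com/kirbs-btw/3d-print-slicer | test_area/slicer_pieces/creating_gcode/creating_gcode.py | calc_fill
-- ===== SOURCE A (Python) =====
-- def calc_fill(dist_arr):
--     fill = []
--     count = 0
--     for layer_dist in dist_arr:
--         fill_layer = []
--         for dist in layer_dist:
--             fill_layer.append(count + dist)
--             count += dist
--         fill.append(fill_layer)
--
--     return fill
-- ===== SOURCE B (Python) =====
-- def calc_fill(dist_arr):
--     lengths = [len(layer) for layer in dist_arr]
--     flat = [d for layer in dist_arr for d in layer]
--     cum = []
--     total = 0
--     for d in flat: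
--         total += d
--         cum.append(total)
--     fill = []
--     i = 0
--     for n in lengths:
--         fill.append(cum[i:i + n])
--         i += n
--     return fill
-- ===== Notes on version B (the rewrite author's own statement) =====
-- stated objective: alternative
-- what changed: Replaced the single interleaved nested loop carrying a running count with a flatten -> inclusive running-sum -> reshape-by-recorded-lengths pipeline.
import Mathlib
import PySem

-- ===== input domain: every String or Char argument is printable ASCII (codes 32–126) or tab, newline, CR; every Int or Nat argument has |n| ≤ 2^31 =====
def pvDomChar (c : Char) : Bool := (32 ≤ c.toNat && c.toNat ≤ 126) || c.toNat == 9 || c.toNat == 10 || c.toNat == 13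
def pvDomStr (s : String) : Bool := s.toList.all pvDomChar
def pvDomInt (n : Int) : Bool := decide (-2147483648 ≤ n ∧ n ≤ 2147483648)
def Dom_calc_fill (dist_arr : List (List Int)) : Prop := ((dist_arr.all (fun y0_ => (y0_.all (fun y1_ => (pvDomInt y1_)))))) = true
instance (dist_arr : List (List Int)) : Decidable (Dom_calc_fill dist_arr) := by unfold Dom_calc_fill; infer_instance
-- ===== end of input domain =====

-- B replaces A's interleaved nested loop (running count threaded through both loops) by a
-- flatten → inclusive running-sum → reshape-by-lengths pipeline; same return value ('alternative').

-- ===== PORT A =====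
-- literal port of A: outer loop over layers, inner loop appends count+dist and updates count
def calc_fill (dist_arr : List (List Int)) : List (List Int) :=
  (dist_arr.foldl (fun (st : List (List Int) × Int) layer_dist =>
      let inner := layer_dist.foldl (fun (p : List Int × Int) dist =>
        (p.1 ++ [p.2 + dist], p.2 + dist)) (([] : List Int), st.2)
      (st.1 ++ [inner.1], inner.2)) (([] : List (List Int)), (0 : Int))).1

-- ===== PORT B =====
-- literal port of Source B: record lengths, flatten, inclusive running sums, reshape by slicing
def calc_fill_alt (dist_arr : List (List Int)) : List (List Int) :=
  let lengths := dist_arr.map (fun layer => PySem.List.len layer)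
  let flat := dist_arr.flatMap (fun layer => layer)
  let cum := (flat.foldl (fun (p : List Int × Int) d =>
      (p.1 ++ [p.2 + d], p.2 + d)) (([] : List Int), (0 : Int))).1
  (lengths.foldl (fun (p : List (List Int) × Int) n =>
      (p.1 ++ [PySem.List.slice cum (some p.2) (some (p.2 + n))], p.2 + n))
    (([] : List (List Int)), (0 : Int))).1

-- ===== PRECONDITION & SPEC =====
def Spec_calc_fill (dist_arr : List (List Int)) (out : List (List Int)) : Prop := out = calc_fill_alt dist_arr
instance (dist_arr : List (List Int)) (out : List (List Int)) : Decidable (Spec_calc_fill dist_arr out) := by unfold Spec_calc_fill; infer_instance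

-- ===== CLAIM (what is proved, stated in full; the proofs are below) =====
def Claim_equal_calc_fill : Prop := ∀ (dist_arr : List (List Int)), Dom_calc_fill dist_arr → Spec_calc_fill dist_arr (calc_fill dist_arr)

-- ===== LEMMAS AND PROOFS =====

/-- inclusive prefix sums starting from `c` -/
def cumFrom (c : Int) : List Int → List Int
  | [] => []
  | d :: ds => (c + d) :: cumFrom (c + d) ds

/-- the intended nested result starting from count `c` -/
def nested (c : Int) : List (List Int) → List (List Int)
  | [] => []
  | l :: ls => cumFrom c l :: nested (c + l.sum) ls

theorem length_cumFrom (c : Int) (l : List Int) : (cumFrom c l).length = l.length := by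
  induction l generalizing c with
  | nil => rfl
  | cons d ds ih => simp [cumFrom, ih]

theorem cumFrom_append (c : Int) (l r : List Int) :
    cumFrom c (l ++ r) = cumFrom c l ++ cumFrom (c + l.sum) r := by
  induction l generalizing c with
  | nil => simp [cumFrom]
  | cons d ds ih => simp [cumFrom, ih, add_assoc]

theorem inner_foldl (l : List Int) (acc : List Int) (c : Int) :
    l.foldl (fun (p : List Int × Int) d => (p.1 ++ [p.2 + d], p.2 + d)) (acc, c)
      = (acc ++ cumFrom c l, c + l.sum) := by
  induction l generalizing acc c with
  | nil => simp [cumFrom]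
  | cons d ds ih => simp [cumFrom, ih, add_assoc]

theorem outer_foldl' (ls : List (List Int)) (acc : List (List Int)) (c : Int) :
    (ls.foldl (fun (st : List (List Int) × Int) layer_dist =>
        (st.1 ++ [cumFrom st.2 layer_dist], st.2 + layer_dist.sum)) (acc, c))
      = (acc ++ nested c ls, c + (ls.map List.sum).sum) := by
  induction ls generalizing acc c with
  | nil => simp [nested]
  | cons l ls ih => simp [nested, ih, add_assoc]

theorem outer_foldl (ls : List (List Int)) (acc : List (List Int)) (c : Int) :
    (ls.foldl (fun (st : List (List Int) × Int) layer_dist =>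
        let inner := layer_dist.foldl (fun (p : List Int × Int) dist =>
          (p.1 ++ [p.2 + dist], p.2 + dist)) (([] : List Int), st.2)
        (st.1 ++ [inner.1], inner.2)) (acc, c))
      = (acc ++ nested c ls, c + (ls.map List.sum).sum) := by
  simp only [inner_foldl, List.nil_append]
  exact outer_foldl' ls acc c

theorem calc_fill_eq_nested (dist_arr : List (List Int)) :
    calc_fill dist_arr = nested 0 dist_arr := by
  simp [calc_fill, outer_foldl]

theorem reshape_foldl (ls : List (List Int)) (pre : List Int) (c : Int)
    (acc : List (List Int)) :
    ((ls.map (fun layer => PySem.List.len layer)).foldl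
        (fun (p : List (List Int) × Int) n =>
          (p.1 ++ [PySem.List.slice (pre ++ cumFrom c ls.flatten) (some p.2) (some (p.2 + n))],
            p.2 + n))
        (acc, (pre.length : Int))).1
      = acc ++ nested c ls := by
  induction ls generalizing pre c acc with
  | nil => simp [nested]
  | cons l ls ih =>
    simp only [List.map_cons, List.foldl_cons, List.flatten_cons, nested]
    have hslice : PySem.List.slice (pre ++ (cumFrom c l ++ cumFrom (c + l.sum) ls.flatten))
        (some (pre.length : Int)) (some ((pre.length : Int) + PySem.List.len l))
        = cumFrom c l := by
      rw [PySem.List.len_eq, ← Int.natCast_add, PySem.List.slice_natCast]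
      simp only [Nat.add_sub_cancel_left, List.drop_left]
      exact List.take_left' (length_cumFrom c l)
    have hidx : (pre.length : Int) + PySem.List.len l = ((pre ++ cumFrom c l).length : Int) := by
      simp [PySem.List.len_eq, length_cumFrom]
    have := ih (pre ++ cumFrom c l) (c + l.sum) (acc ++ [cumFrom c l])
    rw [cumFrom_append, hslice, hidx, ← List.append_assoc pre]
    rw [this]
    simp

theorem calc_fill_alt_eq_nested (dist_arr : List (List Int)) :
    calc_fill_alt dist_arr = nested 0 dist_arr := by
  unfold calc_fill_alt
  simp only [inner_foldl, List.nil_append, List.flatMap_id']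
  have h := reshape_foldl dist_arr [] 0 []
  simpa using h

-- ===== VERDICT (by name: the statement is the Claim_ definition above) =====
theorem calc_fill_spec : Claim_equal_calc_fill := by
  intro dist_arr _
  unfold Spec_calc_fill
  rw [calc_fill_eq_nested, calc_fill_alt_eq_nested]
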